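-- pv_equiv track=rewrite | github.com/dcrops/fastapi-daily-meal-planner-api | app/services.py | split_meals
-- ===== SOURCE A (Python) =====
-- from typing import List
--
-- def split_meals(plan_text: str) -> List[str]:
--     """
--     Split the full GPT response into individual meal sections.
--
--     Instead of requiring exactly 50 dashes, treat any line that is
--     mostly dashes (length >= 10) as a separator.
--     """
--     lines = plan_text.splitlines()
--     blocks: list[list[str]] = []
--     current: list[str] = []
--
--     for line in lines:
--         stripped = line.strip()
--         # separator = a line that is only dashes, length >= 10
--         if stripped and set(stripped) == {"-"} and len(stripped) >= 10:
--             if current: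
--                 blocks.append(current)
--                 current = []
--         else:
--             current.append(line)
--
--     if current:
--         blocks.append(current)
--
--     # Join each block back into a text chunk
--     return ["\n".join(b).strip() for b in blocks if any(l.strip() for l in b)]
-- ===== SOURCE B (Python) =====
-- from typing import List
--
-- def split_meals(plan_text: str) -> List[str]:
--     """Rewrite each dash-separator line to a NUL sentinel, re-join the lines,
--     and let str.split cut the text into chunks; strip and drop blank chunks."""
--     def is_sep(line: str) -> bool:
--         stripped = line.strip()
--         return bool(stripped) and set(stripped) == {"-"} and len(stripped) >= 10
--
--     marked = "\n".join("\x00" if is_sep(l) else l for l in plan_text.splitlines())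
--     return [c.strip() for c in marked.split("\x00") if c.strip()]
-- ===== Notes on version B (the rewrite author's own statement) =====
-- stated objective: alternative
-- what changed: B never builds blocks of lines: it rewrites each dash-separator line to a '\x00' sentinel, re-joins all lines into one string, cuts that string with str.split('\x00'), and keeps the non-blank stripped chunks, replacing A's flush-on-separator accumulator over line lists.
import Mathlib
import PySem

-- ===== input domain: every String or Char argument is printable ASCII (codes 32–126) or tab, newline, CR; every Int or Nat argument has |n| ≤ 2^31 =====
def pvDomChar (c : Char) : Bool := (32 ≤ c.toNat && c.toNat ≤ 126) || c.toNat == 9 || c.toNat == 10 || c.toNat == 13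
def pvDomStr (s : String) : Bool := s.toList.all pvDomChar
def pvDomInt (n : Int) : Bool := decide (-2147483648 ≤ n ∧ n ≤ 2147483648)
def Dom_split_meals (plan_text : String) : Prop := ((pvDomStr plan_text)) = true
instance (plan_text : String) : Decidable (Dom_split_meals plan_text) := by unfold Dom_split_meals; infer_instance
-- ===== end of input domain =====

-- B replaces A's flush-on-separator block accumulator by a string-level algorithm:
-- each separator line is rewritten to a NUL sentinel, the lines are re-joined and the
-- joined string is cut with str.split (objective: alternative; same cost).

-- the separator test shared by both programs: stripped non-empty, only dashes, length >= 10
def pvIsSep (line : String) : Bool :=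
  let stripped := PySem.Str.strip line
  (stripped != "") &&
    PySem.Set.equal (PySem.Set.ofList stripped.toList) (PySem.Set.ofList ['-']) &&
    decide (10 ≤ PySem.Str.len stripped)

-- ===== PORT A =====
-- A's for-loop over the lines with its (blocks, current) accumulator, then the final flush
def pvGoA : List String → List (List String) → List String → List (List String)
  | [], blocks, current => if current.isEmpty then blocks else blocks ++ [current]
  | line :: rest, blocks, current =>
    if pvIsSep line then
      if current.isEmpty then pvGoA rest blocks current
      else pvGoA rest (blocks ++ [current]) []
    else pvGoA rest blocks (current ++ [line])

def split_meals (plan_text : String) : List String :=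
  let lines := PySem.Str.splitlines plan_text
  let blocks := pvGoA lines [] []
  (blocks.filter (fun b => b.any (fun l => PySem.Str.strip l != ""))).map
    (fun b => PySem.Str.strip (PySem.Str.join "\n" b))

-- ===== PORT B =====
-- the NUL sentinel "\x00"
def pvNul : Char := Char.ofNat 0

def split_meals_alt (plan_text : String) : List String :=
  let lines := PySem.Str.splitlines plan_text
  let marked := PySem.Str.join "\n"
    (lines.map (fun l => if pvIsSep l then String.ofList [pvNul] else l))
  let chunks := (PySem.Chars.splitOn marked.toList [pvNul]).map String.ofList
  (chunks.filter (fun c => PySem.Str.strip c != "")).map (fun c => PySem.Str.strip c)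

-- ===== PRECONDITION & SPEC =====
def Spec_split_meals (plan_text : String) (out : List String) : Prop := out = split_meals_alt plan_text
instance (plan_text : String) (out : List String) : Decidable (Spec_split_meals plan_text out) := by unfold Spec_split_meals; infer_instance

-- ===== CLAIM (what is proved, stated in full; the proofs are below) =====
def Claim_equal_split_meals : Prop := ∀ (plan_text : String), Dom_split_meals plan_text → Spec_split_meals plan_text (split_meals plan_text)

-- ===== LEMMAS AND PROOFS =====

-- shorthand used only in the proofs: "\n".join at the char-list level
def pvJ (xs : List (List Char)) : List Char := List.intercalate ['\n'] xs

theorem pvRstrip_append_space (c : Char) (hc : PySem.Chars.isspace c = true) (cs : List Char) :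
    PySem.Chars.rstrip (cs ++ [c]) = PySem.Chars.rstrip cs := by
  simp [PySem.Chars.rstrip, List.dropWhile_cons_of_pos, hc]

theorem pvGo_single (c : Char) :
    ∀ (fuel : Nat) (l cur : List Char) (acc : List (List Char)) (_ : l.length < fuel),
      PySem.Chars.splitOn.go [c] fuel l cur acc =
        acc.reverse ++ List.modifyHead (cur.reverse ++ ·) (List.splitOnP (· == c) l) := by
  intro fuel
  induction fuel with
  | zero => intro l cur acc h; omega
  | succ n ih =>
    intro l cur acc h
    cases l with
    | nil =>
      rw [PySem.Chars.splitOn.go.eq_def]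
      simp [List.splitOnP_nil]
    | cons x rest =>
      by_cases hx : x = c
      · subst hx
        have hpre : [x].isPrefixOf (x :: rest) = true := by simp [List.isPrefixOf]
        rw [PySem.Chars.splitOn.go.eq_def]
        simp only [hpre, if_pos, List.length_cons, List.drop_succ_cons]
        rw [ih _ _ _ (by simpa using Nat.lt_of_succ_lt_succ h), List.splitOnP_cons]
        simp only [beq_self_eq_true, if_pos, List.reverse_cons, List.reverse_nil,
          List.nil_append, List.append_assoc, List.singleton_append]
        cases h2 : List.splitOnP (fun y => y == x) rest <;> simp [h2]
      · have hpre : [c].isPrefixOf (x :: rest) = false := by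
          simp [List.isPrefixOf]
          exact fun hc => absurd hc.symm hx
        rw [PySem.Chars.splitOn.go.eq_def]
        simp only [hpre, Bool.false_eq_true, if_false]
        rw [ih _ _ _ (by simpa using Nat.lt_of_succ_lt_succ h), List.splitOnP_cons,
          if_neg (by simp [hx]), List.modifyHead_modifyHead]
        simp [Function.comp_def]

theorem pvGo_splitlines (isB : Char → Bool) :
    ∀ (n : Nat) (s cur : List Char) (acc : List (List Char)) (_ : s.length ≤ n) (l : List Char)
      (_ : l ∈ PySem.Chars.splitlines.go isB s cur acc) (c : Char) (_ : c ∈ l),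
      c ∈ s ∨ c ∈ cur ∨ ∃ l' ∈ acc, c ∈ l' := by
  intro n
  induction n with
  | zero =>
    intro s cur acc hn l hl c hc
    have : s = [] := List.eq_nil_of_length_eq_zero (by omega)
    subst this
    rw [PySem.Chars.splitlines.go.eq_def] at hl
    simp only [] at hl
    split_ifs at hl with h
    · simp at hl
      exact Or.inr (Or.inr ⟨l, by simpa using hl, hc⟩)
    · simp at hl
      rcases hl with hl | hl
      · exact Or.inr (Or.inr ⟨l, hl, hc⟩)
      · subst hl; exact Or.inr (Or.inl (by simpa using hc))
  | succ n ih =>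
    intro s cur acc hn l hl c hc
    rw [PySem.Chars.splitlines.go.eq_def] at hl
    split at hl
    · -- s = []
      split_ifs at hl with h
      · simp at hl
        exact Or.inr (Or.inr ⟨l, by simpa using hl, hc⟩)
      · simp at hl
        rcases hl with hl | hl
        · exact Or.inr (Or.inr ⟨l, hl, hc⟩)
        · subst hl; exact Or.inr (Or.inl (by simpa using hc))
    · -- s = '\x0d' :: '\n' :: rest
      rename_i rest
      rcases ih rest [] (cur.reverse :: acc) (by simp at hn ⊢; omega) l hl c hc with h1 | h1 | ⟨l', hl', hcl'⟩
      · exact Or.inl (by simp [h1])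
      · simp at h1
      · rcases List.mem_cons.1 hl' with h2 | h2
        · subst h2; exact Or.inr (Or.inl (by simpa using hcl'))
        · exact Or.inr (Or.inr ⟨l', h2, hcl'⟩)
    · -- s = c' :: rest, catchall
      rename_i c' rest _
      split_ifs at hl with h
      · rcases ih rest [] (cur.reverse :: acc) (by simp at hn ⊢; omega) l hl c hc with h1 | h1 | ⟨l', hl', hcl'⟩
        · exact Or.inl (by simp [h1])
        · simp at h1
        · rcases List.mem_cons.1 hl' with h2 | h2
          · subst h2; exact Or.inr (Or.inl (by simpa using hcl'))
          · exact Or.inr (Or.inr ⟨l', h2, hcl'⟩)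
      · rcases ih rest (c' :: cur) acc (by simp at hn ⊢; omega) l hl c hc with h1 | h1 | ⟨l', hl', hcl'⟩
        · exact Or.inl (by simp [h1])
        · rcases List.mem_cons.1 h1 with h2 | h2
          · exact Or.inl (by simp [h2])
          · exact Or.inr (Or.inl h2)
        · exact Or.inr (Or.inr ⟨l', hl', hcl'⟩)

-- A's loop is splitOnP on the separator predicate, with empty groups dropped
theorem pvGoA_eq (lines : List String) :
    ∀ (blocks : List (List String)) (cur : List String),
      pvGoA lines blocks cur =
        blocks ++ (List.modifyHead (cur ++ ·) (lines.splitOnP pvIsSep)).filter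
          (fun b => !b.isEmpty) := by
  induction lines with
  | nil =>
    intro blocks cur
    by_cases h : cur = [] <;> simp [pvGoA, h, List.splitOnP_nil]
  | cons x xs ih =>
    intro blocks cur
    by_cases hx : pvIsSep x
    · rw [List.splitOnP_cons, if_pos hx]
      by_cases hc : cur = []
      · subst hc
        rw [show pvGoA (x :: xs) blocks [] = pvGoA xs blocks [] by simp [pvGoA, hx], ih]
        cases h2 : List.splitOnP pvIsSep xs <;> simp [h2]
      · rw [show pvGoA (x :: xs) blocks cur = pvGoA xs (blocks ++ [cur]) [] by
          simp [pvGoA, hx, hc], ih]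
        cases h2 : List.splitOnP pvIsSep xs <;> simp [h2, hc]
    · rw [List.splitOnP_cons, if_neg (by simpa using hx)]
      rw [show pvGoA (x :: xs) blocks cur = pvGoA xs blocks (cur ++ [x]) by
        simp [pvGoA, hx], ih, List.modifyHead_modifyHead]
      have hf : ((fun b => cur ++ b) ∘ (List.cons x)) = (fun b => (cur ++ [x]) ++ b) := by
        funext t; simp
      rw [hf]

theorem pvSplitOn_single (c : Char) (s : List Char) :
    PySem.Chars.splitOn s [c] = List.splitOnP (· == c) s := by
  rw [PySem.Chars.splitOn, pvGo_single c (s.length + 1) s [] [] (by omega)]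
  cases h : List.splitOnP (· == c) s with
  | nil => exact absurd h (List.splitOnP_ne_nil _ _)
  | cons a b => simp


-- splitOnP walks over a separator-free prefix
theorem pvSplitOnP_append (p : Char → Bool) (a b : List Char) (h : ∀ x ∈ a, p x = false) :
    List.splitOnP p (a ++ b) = List.modifyHead (a ++ ·) (List.splitOnP p b) := by
  induction a with
  | nil => cases h2 : List.splitOnP p b <;> simp [h2]
  | cons x xs ih =>
    have hx : p x = false := h x (by simp)
    rw [List.cons_append, List.splitOnP_cons, if_neg (by simp [hx]),
      ih (fun y hy => h y (by simp [hy])), List.modifyHead_modifyHead]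
    rfl


theorem pvSplitOnP_sep_free (p : Char → Bool) (a : List Char) (h : ∀ x ∈ a, p x = false) :
    List.splitOnP p a = [a] := by
  have := pvSplitOnP_append p a [] h
  simpa [List.splitOnP_nil] using this


theorem pvSplitOnP_mid (p : Char → Bool) (a : List Char) (x : Char) (b : List Char)
    (h : ∀ y ∈ a, p y = false) (hx : p x = true) :
    List.splitOnP p (a ++ x :: b) = a :: List.splitOnP p b := by
  rw [pvSplitOnP_append p a _ h, List.splitOnP_cons, if_pos hx, List.modifyHead_cons]
  simp


-- intercalate over "\n"
theorem pvJ_cons (a : List Char) (rest : List (List Char)) (h : rest ≠ []) :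
    pvJ (a :: rest) = a ++ '\n' :: pvJ rest := by
  obtain ⟨y, ys, rfl⟩ := List.exists_cons_of_ne_nil h
  simp [pvJ, List.intercalate, List.intersperse]


theorem pvJ_append (a b : List (List Char)) (ha : a ≠ []) (hb : b ≠ []) :
    pvJ (a ++ b) = pvJ a ++ '\n' :: pvJ b := by
  induction a with
  | nil => simp at ha
  | cons x xs ih =>
    cases xs with
    | nil => rw [List.singleton_append, pvJ_cons x b hb]; simp [pvJ, List.intercalate, List.intersperse]
    | cons y ys =>
      rw [List.cons_append, pvJ_cons x _ (by simp), pvJ_cons x _ (by simp),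
        ih (by simp)]
      simp


theorem pvMem_J (xs : List (List Char)) (c : Char) (h : c ∈ pvJ xs) :
    c = '\n' ∨ ∃ l ∈ xs, c ∈ l := by
  induction xs with
  | nil => simp [pvJ, List.intercalate] at h
  | cons x rest ih =>
    cases rest with
    | nil =>
      simp [pvJ, List.intercalate] at h
      exact Or.inr ⟨x, by simp, h⟩
    | cons y ys =>
      rw [pvJ_cons x _ (by simp)] at h
      rcases List.mem_append.1 h with h1 | h1
      · exact Or.inr ⟨x, by simp, h1⟩
      · rcases List.mem_cons.1 h1 with h2 | h2
        · exact Or.inl h2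
        · rcases ih h2 with h3 | ⟨l, hl, hcl⟩
          · exact Or.inl h3
          · exact Or.inr ⟨l, by simp [hl], hcl⟩


-- the group-level intercalate with the sentinel line
theorem pvII_cons (a : List (List Char)) (rest : List (List (List Char))) (h : rest ≠ []) :
    List.intercalate [[pvNul]] (a :: rest) = a ++ [pvNul] :: List.intercalate [[pvNul]] rest := by
  obtain ⟨y, ys, rfl⟩ := List.exists_cons_of_ne_nil h
  simp [List.intercalate, List.intersperse]


-- strip ignores surrounding whitespace
theorem pvStrip_cons_space (c : Char) (hc : PySem.Chars.isspace c = true) (cs : List Char) :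
    PySem.Chars.strip (c :: cs) = PySem.Chars.strip cs := by
  simp [PySem.Chars.strip, PySem.Chars.lstrip, List.dropWhile_cons_of_pos, hc]


theorem pvStrip_append_space (c : Char) (hc : PySem.Chars.isspace c = true) (cs : List Char) :
    PySem.Chars.strip (cs ++ [c]) = PySem.Chars.strip cs := by
  unfold PySem.Chars.strip
  rw [PySem.Chars.lstrip, PySem.Chars.lstrip, List.dropWhile_append]
  split_ifs with h
  · have h' : List.dropWhile PySem.Chars.isspace cs = [] := by simpa using h
    rw [h']
    simp [List.dropWhile_cons_of_pos, hc, PySem.Chars.rstrip]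
  · exact pvRstrip_append_space c hc _


theorem pvStrip_prefix_space (pre cs : List Char) (h : ∀ c ∈ pre, PySem.Chars.isspace c = true) :
    PySem.Chars.strip (pre ++ cs) = PySem.Chars.strip cs := by
  induction pre with
  | nil => simp
  | cons x xs ih =>
    rw [List.cons_append, pvStrip_cons_space x (h x (by simp)), ih (fun c hcc => h c (by simp [hcc]))]


theorem pvStrip_eq_nil_iff (cs : List Char) :
    PySem.Chars.strip cs = [] ↔ ∀ c ∈ cs, PySem.Chars.isspace c = true := by
  constructor
  · intro h c hc
    have h1 : ∀ x ∈ List.dropWhile PySem.Chars.isspace cs, PySem.Chars.isspace x = true := by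
      intro x hx
      have h0 : List.dropWhile PySem.Chars.isspace
          (List.dropWhile PySem.Chars.isspace cs).reverse = [] :=
        List.reverse_eq_nil_iff.mp (by
          simpa [PySem.Chars.strip, PySem.Chars.rstrip, PySem.Chars.lstrip] using h)
      exact List.dropWhile_eq_nil_iff.mp h0 x (by simpa using hx)
    rw [← List.takeWhile_append_dropWhile (p := PySem.Chars.isspace) (l := cs)] at hc
    rcases List.mem_append.1 hc with h2 | h2
    · exact List.mem_takeWhile_imp h2
    · exact h1 _ h2
  · intro h
    unfold PySem.Chars.strip PySem.Chars.rstrip PySem.Chars.lstrip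
    simp [List.dropWhile_eq_nil_iff]
    intro x hx1
    exact h x (List.dropWhile_sublist _ |>.mem hx1)


-- every character of a splitlines line is a character of the input
theorem pvMem_splitlines (s : List Char) (l : List Char) (hl : l ∈ PySem.Chars.splitlines s)
    (c : Char) (hc : c ∈ l) : c ∈ s := by
  unfold PySem.Chars.splitlines at hl
  rcases pvGo_splitlines _ s.length s [] [] le_rfl l hl c hc with h | h | ⟨l', hl', _⟩
  · exact h
  · simp at h
  · simp at hl'


-- marking the lines = intercalating the sentinel line between the groups
theorem pvInter_head {α : Type} (s : List α) (x : α) (h : List α) (t : List (List α)) :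
    List.intercalate s ((x :: h) :: t) = x :: List.intercalate s (h :: t) := by
  cases t <;> simp [List.intercalate]

theorem pvMarked_eq (lines : List String) :
    lines.map (fun l => if pvIsSep l then [pvNul] else l.toList) =
      List.intercalate [[pvNul]] ((lines.splitOnP pvIsSep).map (List.map String.toList)) := by
  induction lines with
  | nil => simp [List.splitOnP_nil, List.intercalate]
  | cons x xs ih =>
    rw [List.map_cons, List.splitOnP_cons]
    by_cases hx : pvIsSep x
    · rw [if_pos hx, if_pos hx, List.map_cons, List.map_nil,
        pvII_cons _ _ (by simpa using List.splitOnP_ne_nil pvIsSep xs), List.nil_append, ih]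
    · rw [if_neg hx, if_neg (by simpa using hx)]
      cases h : List.splitOnP pvIsSep xs with
      | nil => exact absurd h (List.splitOnP_ne_nil _ _)
      | cons g t =>
        rw [h] at ih
        rw [List.modifyHead_cons, List.map_cons, List.map_cons,
          pvInter_head [[pvNul]] x.toList (g.map String.toList) (t.map (List.map String.toList))]
        exact congrArg (x.toList :: ·) (by rw [ih, List.map_cons])

-- no character of a NUL-free joined group is the sentinel

theorem pvNe_nul : ('\n' == pvNul) = false := by decide

theorem pvFree (pre : List Char) (hpre : ∀ c ∈ pre, c = '\n')
    (gl : List (List Char)) (hg : ∀ l ∈ gl, pvNul ∉ l) :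
    ∀ y ∈ pre ++ pvJ gl, (y == pvNul) = false := by
  intro y hy
  rcases List.mem_append.1 hy with h | h
  · rw [hpre y h]; exact pvNe_nul
  · rcases pvMem_J gl y h with rfl | ⟨l, hl, hyl⟩
    · exact pvNe_nul
    · simp only [beq_eq_false_iff_ne, ne_eq]
      intro hEq; exact hg l hl (hEq ▸ hyl)

theorem pvFreePre (pre : List Char) (hpre : ∀ c ∈ pre, c = '\n') :
    ∀ y ∈ pre, (y == pvNul) = false := by
  intro y hy; rw [hpre y hy]; exact pvNe_nul

theorem pvFreeNl (pre : List Char) (hpre : ∀ c ∈ pre, c = '\n')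
    (gl : List (List Char)) (hg : ∀ l ∈ gl, pvNul ∉ l) :
    ∀ y ∈ pre ++ (pvJ gl ++ ['\n']), (y == pvNul) = false := by
  intro y hy
  rcases List.mem_append.1 hy with h | h
  · exact pvFreePre pre hpre y h
  · rcases List.mem_append.1 h with h1 | h1
    · exact pvFree [] (by simp) gl hg y (by simpa using h1)
    · simp at h1; rw [h1]; exact pvNe_nul

theorem pvStrip_nil : PySem.Chars.strip [] = [] := rfl

theorem pvMain (Gl : List (List (List Char))) (hne : Gl ≠ [])
    (hfree : ∀ gl ∈ Gl, ∀ l ∈ gl, pvNul ∉ l) :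
    ∀ (pre : List Char), (∀ c ∈ pre, c = '\n') →
      (List.splitOnP (· == pvNul) (pre ++ pvJ (List.intercalate [[pvNul]] Gl))).map PySem.Chars.strip =
        Gl.map (fun gl => PySem.Chars.strip (pvJ gl)) := by
  induction Gl with
  | nil => exact absurd rfl hne
  | cons gl rest ih =>
    intro pre hpre
    have hglfree : ∀ l ∈ gl, pvNul ∉ l := hfree gl (by simp)
    have hprespace : ∀ c ∈ pre, PySem.Chars.isspace c = true := by
      intro c hc; rw [hpre c hc]; decide
    have h0 : PySem.Chars.strip pre = [] := (pvStrip_eq_nil_iff pre).mpr hprespace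
    cases rest with
    | nil =>
      rw [show List.intercalate [[pvNul]] [gl] = gl by simp [List.intercalate],
        pvSplitOnP_sep_free _ _ (pvFree pre hpre gl hglfree), List.map_cons, List.map_nil,
        List.map_cons, List.map_nil, pvStrip_prefix_space pre _ hprespace]
    | cons g2 t2 =>
      have hrne : (g2 :: t2 : List (List (List Char))) ≠ [] := by simp
      have hrfree : ∀ gl' ∈ g2 :: t2, ∀ l ∈ gl', pvNul ∉ l := by
        intro gl' hgl' l hl; exact hfree gl' (by simp [hgl']) l hl
      rw [pvII_cons gl (g2 :: t2) hrne]
      by_cases hgl : gl = []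
      · subst hgl
        rw [List.nil_append]
        cases hII : List.intercalate [[pvNul]] (g2 :: t2) with
        | nil =>
          have hemp : g2 = [] ∧ t2 = [] := by
            cases t2 with
            | nil => simpa [List.intercalate] using hII
            | cons g3 t3 =>
              rw [pvII_cons g2 (g3 :: t3) (by simp)] at hII
              exact absurd hII (by simp)
          obtain ⟨rfl, rfl⟩ := hemp
          rw [show pvJ [[pvNul]] = [pvNul] by simp [pvJ, List.intercalate],
            show pre ++ [pvNul] = pre ++ pvNul :: [] by simp,
            pvSplitOnP_mid _ pre pvNul [] (pvFreePre pre hpre) (by simp), List.splitOnP_nil]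
          simp [h0, pvStrip_nil, pvJ, List.intercalate]
        | cons c1 cs1 =>
          rw [pvJ_cons [pvNul] _ (by simp [hII]), ← hII,
            show pre ++ ([pvNul] ++ '\n' :: pvJ (List.intercalate [[pvNul]] (g2 :: t2))) =
              pre ++ pvNul :: ('\n' :: pvJ (List.intercalate [[pvNul]] (g2 :: t2))) by simp,
            pvSplitOnP_mid _ pre pvNul _ (pvFreePre pre hpre) (by simp), List.map_cons,
            show ('\n' :: pvJ (List.intercalate [[pvNul]] (g2 :: t2))) =
              ['\n'] ++ pvJ (List.intercalate [[pvNul]] (g2 :: t2)) by simp,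
            ih hrne hrfree ['\n'] (by intro c hc; simpa using hc)]
          simp [h0, pvStrip_nil, pvJ, List.intercalate]
      · rw [pvJ_append gl ([pvNul] :: List.intercalate [[pvNul]] (g2 :: t2)) hgl (by simp)]
        have h1 : PySem.Chars.strip (pre ++ (pvJ gl ++ ['\n'])) = PySem.Chars.strip (pvJ gl) := by
          rw [pvStrip_prefix_space pre _ hprespace, pvStrip_append_space '\n' (by decide)]
        cases hII : List.intercalate [[pvNul]] (g2 :: t2) with
        | nil =>
          have hemp : g2 = [] ∧ t2 = [] := by
            cases t2 with
            | nil => simpa [List.intercalate] using hII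
            | cons g3 t3 =>
              rw [pvII_cons g2 (g3 :: t3) (by simp)] at hII
              exact absurd hII (by simp)
          obtain ⟨rfl, rfl⟩ := hemp
          rw [show pvJ [[pvNul]] = [pvNul] by simp [pvJ, List.intercalate],
            show pre ++ (pvJ gl ++ '\n' :: [pvNul]) =
              (pre ++ (pvJ gl ++ ['\n'])) ++ pvNul :: [] by simp,
            pvSplitOnP_mid _ _ pvNul [] (pvFreeNl pre hpre gl hglfree) (by simp),
            List.splitOnP_nil]
          simp only [List.map_cons, List.map_nil]
          rw [h1]
          simp [pvStrip_nil, pvJ, List.intercalate]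
        | cons c1 cs1 =>
          rw [pvJ_cons [pvNul] _ (by simp [hII]), ← hII,
            show pre ++ (pvJ gl ++ '\n' :: ([pvNul] ++ '\n' :: pvJ (List.intercalate [[pvNul]] (g2 :: t2)))) =
              (pre ++ (pvJ gl ++ ['\n'])) ++ pvNul :: ('\n' :: pvJ (List.intercalate [[pvNul]] (g2 :: t2))) by simp,
            pvSplitOnP_mid _ _ pvNul _ (pvFreeNl pre hpre gl hglfree) (by simp), List.map_cons,
            show ('\n' :: pvJ (List.intercalate [[pvNul]] (g2 :: t2))) =
              ['\n'] ++ pvJ (List.intercalate [[pvNul]] (g2 :: t2)) by simp,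
            ih hrne hrfree ['\n'] (by intro c hc; simpa using hc)]
          rw [List.map_cons, h1, List.map_cons, List.map_cons]

theorem pvMem_J_of_mem (xs : List (List Char)) (l : List Char) (hl : l ∈ xs)
    (c : Char) (hc : c ∈ l) : c ∈ pvJ xs := by
  induction xs with
  | nil => simp at hl
  | cons x rest ih =>
    cases rest with
    | nil =>
      simp at hl; subst hl; simpa [pvJ, List.intercalate] using hc
    | cons y ys =>
      rw [pvJ_cons x _ (by simp)]
      rcases List.mem_cons.1 hl with h | h
      · subst h; exact List.mem_append.2 (Or.inl hc)
      · exact List.mem_append.2 (Or.inr (List.mem_cons.2 (Or.inr (ih h))))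

-- s != "" computes emptiness of the character list

theorem pvNe_empty (s : String) : (s != "") = !(s.toList.isEmpty) := by
  by_cases h : s = ""
  · subst h; rfl
  · have h2 : s.toList ≠ [] := by
      intro hh
      exact h (by
        have := congrArg String.ofList hh
        simpa using this)
    rw [List.isEmpty_eq_false_iff_exists_mem.mpr (by
      cases hx : s.toList with
      | nil => exact absurd hx h2
      | cons t ts => exact ⟨t, by simp [hx]⟩)]
    simp [bne_iff_ne, h]

theorem pvBlank_filter (grp : List String) :
    (grp.any (fun l => PySem.Str.strip l != "")) =
      !(PySem.Chars.strip (pvJ (grp.map String.toList))).isEmpty := by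
  have h1 : ∀ l : String, (PySem.Str.strip l != "") = !((PySem.Chars.strip l.toList).isEmpty) := by
    intro l
    rw [pvNe_empty, PySem.Str.toList_strip]
  by_cases hr : PySem.Chars.strip (pvJ (grp.map String.toList)) = []
  · rw [hr]
    simp only [List.isEmpty_nil, Bool.not_true, List.any_eq_false]
    intro l hl
    have hsp := (pvStrip_eq_nil_iff _).mp hr
    have : PySem.Chars.strip l.toList = [] := by
      exact (pvStrip_eq_nil_iff _).mpr (fun c hc =>
        hsp c (pvMem_J_of_mem _ l.toList (List.mem_map_of_mem hl) c hc))
    simp [h1, this]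
  · have h3 : ∃ c ∈ pvJ (grp.map String.toList), PySem.Chars.isspace c = false := by
      by_contra hno
      exact hr ((pvStrip_eq_nil_iff _).mpr (fun c hc => by
        by_contra hcs2
        exact hno ⟨c, hc, by simpa using hcs2⟩))
    obtain ⟨c, hc, hcs⟩ := h3
    rcases pvMem_J _ c hc with rfl | ⟨lt, hlt, hclt⟩
    · exact absurd hcs (by simp; decide)
    · obtain ⟨l, hl, rfl⟩ := List.mem_map.1 hlt
      have h4 : PySem.Chars.strip l.toList ≠ [] := by
        intro hh
        have := (pvStrip_eq_nil_iff _).mp hh c hclt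
        simp [this] at hcs
      have h5 : (PySem.Chars.strip (pvJ (List.map String.toList grp))).isEmpty = false := by
        cases hx : PySem.Chars.strip (pvJ (List.map String.toList grp)) with
        | nil => exact absurd hx hr
        | cons t ts => rfl
      rw [h5]
      simp only [Bool.not_false, List.any_eq_true]
      refine ⟨l, hl, ?_⟩
      rw [h1 l]
      cases hx : PySem.Chars.strip l.toList with
      | nil => exact absurd hx h4
      | cons t ts => rfl

theorem pvMem_splitOnP (p : String → Bool) :
    ∀ (xs : List String) (g : List String), g ∈ xs.splitOnP p → ∀ a ∈ g, a ∈ xs := by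
  intro xs
  induction xs with
  | nil =>
    intro g hg a ha
    rw [List.splitOnP_nil] at hg
    simp at hg; subst hg; simp at ha
  | cons x t ih =>
    intro g hg a ha
    rw [List.splitOnP_cons] at hg
    split_ifs at hg with hx
    · rcases List.mem_cons.1 hg with h | h
      · subst h; simp at ha
      · exact List.mem_cons.2 (Or.inr (ih g h a ha))
    · cases hsp : List.splitOnP p t with
      | nil => exact absurd hsp (List.splitOnP_ne_nil _ _)
      | cons g0 gs =>
        rw [hsp, List.modifyHead_cons] at hg
        rcases List.mem_cons.1 hg with h | h
        · subst h
          rcases List.mem_cons.1 ha with h2 | h2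
          · simp [h2]
          · exact List.mem_cons.2 (Or.inr (ih g0 (by simp [hsp]) a h2))
        · exact List.mem_cons.2 (Or.inr (ih g (by simp [hsp, h]) a ha))

theorem pvMapToListInj (a b : List String) (h : a.map String.toList = b.map String.toList) :
    a = b := by
  have hinj : Function.Injective String.toList := fun x y hxy => by
    have := congrArg String.ofList hxy
    simpa using this
  exact List.map_injective_iff.mpr hinj h

theorem pvA_eq (s : String) :
    (split_meals s).map String.toList =
      (((PySem.Str.splitlines s).splitOnP pvIsSep).filter
        (fun b => b.any (fun l => PySem.Str.strip l != ""))).map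
        (fun b => PySem.Chars.strip (pvJ (b.map String.toList))) := by
  show (((pvGoA (PySem.Str.splitlines s) [] []).filter
      (fun b => b.any (fun l => PySem.Str.strip l != ""))).map
      (fun b => PySem.Str.strip (PySem.Str.join "\n" b))).map String.toList = _
  rw [pvGoA_eq (PySem.Str.splitlines s) [] []]
  have hmh : List.modifyHead (fun b => [] ++ b) ((PySem.Str.splitlines s).splitOnP pvIsSep)
      = (PySem.Str.splitlines s).splitOnP pvIsSep := by
    cases ((PySem.Str.splitlines s).splitOnP pvIsSep) <;> simp
  rw [List.nil_append, hmh, List.filter_filter, List.map_map]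
  rw [List.filter_congr (q := fun b => b.any fun l => PySem.Str.strip l != "")
    (by intro b _; cases b <;> simp)]
  apply List.map_congr_left
  intro b _
  have h1 : ("\n" : String).toList = ['\n'] := by decide
  simp only [Function.comp, PySem.Str.toList_strip, PySem.Str.toList_join, h1]
  rfl

theorem pvB_eq (s : String) (hfree : ∀ l ∈ PySem.Str.splitlines s, pvNul ∉ l.toList) :
    (split_meals_alt s).map String.toList =
      (((PySem.Str.splitlines s).splitOnP pvIsSep).filter
        (fun b => b.any (fun l => PySem.Str.strip l != ""))).map
        (fun b => PySem.Chars.strip (pvJ (b.map String.toList))) := by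
  have h1 : ("\n" : String).toList = ['\n'] := by decide
  have hmark :
      (PySem.Str.join "\n" ((PySem.Str.splitlines s).map
        (fun l => if pvIsSep l then String.ofList [pvNul] else l))).toList
        = pvJ (List.intercalate [[pvNul]]
            (((PySem.Str.splitlines s).splitOnP pvIsSep).map (List.map String.toList))) := by
    rw [PySem.Str.toList_join, List.map_map]
    have hc : ((PySem.Str.splitlines s).map
        (String.toList ∘ fun l => if pvIsSep l then String.ofList [pvNul] else l)) =
        (PySem.Str.splitlines s).map (fun l => if pvIsSep l then [pvNul] else l.toList) := by
      apply List.map_congr_left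
      intro l _
      by_cases h : pvIsSep l <;> simp [h]
    rw [hc, pvMarked_eq, h1]
    rfl
  have hGlfree : ∀ gl ∈ ((PySem.Str.splitlines s).splitOnP pvIsSep).map (List.map String.toList),
      ∀ l ∈ gl, pvNul ∉ l := by
    intro gl hgl l hlm
    obtain ⟨b, hb, rfl⟩ := List.mem_map.1 hgl
    obtain ⟨a, ha, rfl⟩ := List.mem_map.1 hlm
    exact hfree a (pvMem_splitOnP pvIsSep _ b hb a ha)
  have hGlne : ((PySem.Str.splitlines s).splitOnP pvIsSep).map (List.map String.toList) ≠ [] := by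
    intro h
    exact List.splitOnP_ne_nil _ _ (List.map_eq_nil_iff.1 h)
  have hmainC := pvMain _ hGlne hGlfree [] (by simp)
  rw [List.nil_append] at hmainC
  show ((((PySem.Chars.splitOn (PySem.Str.join "\n" ((PySem.Str.splitlines s).map
      (fun l => if pvIsSep l then String.ofList [pvNul] else l))).toList [pvNul]).map
      String.ofList).filter (fun c => PySem.Str.strip c != "")).map
      (fun c => PySem.Str.strip c)).map String.toList = _
  rw [hmark, pvSplitOn_single, List.map_map, List.filter_map, List.map_map]
  rw [List.filter_congr (q := fun ch => !(PySem.Chars.strip ch).isEmpty)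
    (by
      intro ch _
      simp only [Function.comp]
      rw [pvNe_empty, PySem.Str.toList_strip, String.toList_ofList])]
  rw [List.map_congr_left (g := PySem.Chars.strip)
    (by
      intro ch _
      simp only [Function.comp]
      rw [PySem.Str.toList_strip, String.toList_ofList])]
  rw [List.filter_congr (q := (fun x => !x.isEmpty) ∘ PySem.Chars.strip) (by intro ch _; rfl)]
  rw [← List.filter_map, hmainC, List.filter_map, List.filter_map, List.map_map]
  rw [List.filter_congr (q := fun b => b.any fun l => PySem.Str.strip l != "")
    (by
      intro b _
      simp only [Function.comp]
      exact (pvBlank_filter b).symm)]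
  apply List.map_congr_left
  intro b _
  rfl

-- ===== VERDICT (by name: the statement is the Claim_ definition above) =====
theorem split_meals_spec : Claim_equal_split_meals := by
  intro s hdom
  show split_meals s = split_meals_alt s
  have hall : ∀ c ∈ s.toList, pvDomChar c = true :=
    List.all_eq_true.mp (by simpa [Dom_split_meals, pvDomStr] using hdom)
  have hfree : ∀ l ∈ PySem.Str.splitlines s, pvNul ∉ l.toList := by
    intro l hl hmem
    have hLmem : l.toList ∈ PySem.Chars.splitlines s.toList := by
      rw [← PySem.Str.splitlines_map_toList]
      exact List.mem_map_of_mem hl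
    have hns : pvNul ∈ s.toList := pvMem_splitlines s.toList l.toList hLmem pvNul hmem
    exact absurd (hall pvNul hns) (by decide)
  exact pvMapToListInj _ _ ((pvA_eq s).trans (pvB_eq s hfree).symm)
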